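-- pv_equiv track=rewrite | github.com/nickmancol/hn-hiring | hn_hiring_scraper.py | get_list_vals
-- ===== SOURCE A (Python) =====
-- def get_list_vals(row, field, max=3):
--     res = []
--     for i in range(0, max):
--         val = None
--         if i < len(row[field]):
--             val = str(row[field][i]).strip()
--         res.append(val)
--     return res
-- ===== SOURCE B (Python) =====
-- def get_list_vals(row, field, max=3):
--     # Same return value as the original: slice-and-pad instead of per-index loop.
--     if max <= 0:
--         return []
--     vals = [str(x).strip() for x in row[field][:max]]
--     return vals + [None] * (max - len(vals))
-- ===== Notes on version B (the rewrite author's own statement) =====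
-- stated objective: simpler
-- what changed: Replaces the per-index loop with a bounds test in each iteration by a two-pass slice-map over the actual elements followed by a single None-padding append (guarded for non-positive max).
import Mathlib
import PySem

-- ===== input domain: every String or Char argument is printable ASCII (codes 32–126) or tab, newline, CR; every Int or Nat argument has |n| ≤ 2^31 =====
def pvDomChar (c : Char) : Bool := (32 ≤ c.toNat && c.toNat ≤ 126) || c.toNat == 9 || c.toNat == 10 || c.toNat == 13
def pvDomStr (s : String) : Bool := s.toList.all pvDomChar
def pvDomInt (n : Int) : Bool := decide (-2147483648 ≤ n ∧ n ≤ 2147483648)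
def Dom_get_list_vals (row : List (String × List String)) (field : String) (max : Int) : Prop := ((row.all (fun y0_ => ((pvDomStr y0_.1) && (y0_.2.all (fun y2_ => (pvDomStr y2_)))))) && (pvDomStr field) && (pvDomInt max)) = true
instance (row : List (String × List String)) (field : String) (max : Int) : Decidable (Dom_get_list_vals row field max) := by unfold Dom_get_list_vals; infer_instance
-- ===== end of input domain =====

-- B computes the same values as A with a slice-map plus one padding append instead of A's per-index bounds-branch loop (objective: simpler).


-- ===== PORT A =====
def get_list_vals (row : List (String × List String)) (field : String) (max : Int) : List (Option String) :=
  (PySem.List.pyRange 0 max 1).foldl (fun res i =>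
    -- row[field] (dict lookup; Pre_ guarantees presence when the loop runs, so getD [] is never observed)
    let lst := ((PySem.Dict.mk row).get? field).getD []
    -- val = None; if i < len(row[field]): val = str(row[field][i]).strip(); res.append(val)
    res ++ [if i < (lst.length : Int) then
              some (PySem.Str.strip (PySem.List.pyGetD lst i ""))
            else none]) []

-- ===== PORT B =====
def get_list_vals_alt (row : List (String × List String)) (field : String) (max : Int) : List (Option String) :=
  if max ≤ 0 then []
  else
    let lst := ((PySem.Dict.mk row).get? field).getD []
    -- vals = [str(x).strip() for x in row[field][:max]]
    let vals := (PySem.List.slice lst none (some max)).map (fun s => some (PySem.Str.strip s))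
    -- vals + [None] * (max - len(vals))
    vals ++ List.replicate (max - (vals.length : Int)).toNat (none : Option String)

-- ===== PRECONDITION & SPEC =====
-- Pre_ excludes only inputs where A raises KeyError: max > 0 with field not a key of row.
def Pre_get_list_vals (row : List (String × List String)) (field : String) (max : Int) : Prop :=
  max ≤ 0 ∨ ((PySem.Dict.mk row).get? field).isSome = true
instance (row : List (String × List String)) (field : String) (max : Int) : Decidable (Pre_get_list_vals row field max) := by unfold Pre_get_list_vals; infer_instance

def pvWitness_get_list_vals : (List (String × List String)) × String × Int := ([("f", [" x ", "y"])], "f", 3)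

def Spec_get_list_vals (row : List (String × List String)) (field : String) (max : Int) (out : List (Option String)) : Prop := out = get_list_vals_alt row field max
instance (row : List (String × List String)) (field : String) (max : Int) (out : List (Option String)) : Decidable (Spec_get_list_vals row field max out) := by unfold Spec_get_list_vals; infer_instance

-- ===== CLAIM (what is proved, stated in full; the proofs are below) =====
def Claim_equal_get_list_vals : Prop := ∀ (row : List (String × List String)) (field : String) (max : Int), Dom_get_list_vals row field max → Pre_get_list_vals row field max → Spec_get_list_vals row field max (get_list_vals row field max)

-- ===== LEMMAS AND PROOFS =====

-- Core agreement: per-index loop over range n with a bounds branch = map-strip over take n ++ None padding.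
lemma pv_key (lst : List String) (n : Nat) :
    (List.range n).map (fun (k : Nat) => if ((k : Int)) < (lst.length : Int) then
        some (PySem.Str.strip (PySem.List.pyGetD lst (k : Int) "")) else none)
    = (lst.take n).map (fun s => some (PySem.Str.strip s)) ++
      List.replicate (n - lst.length) (none : Option String) := by
  induction n with
  | zero => simp
  | succ m ih =>
    rw [List.range_succ, List.map_append, ih]
    by_cases h : m < lst.length
    · have h1 : (m : Int) < (lst.length : Int) := by exact_mod_cast h
      have h2 : m + 1 - lst.length = 0 := by omega
      have h3 : m - lst.length = 0 := by omega
      simp only [List.map_cons, List.map_nil, if_pos h1, h2, h3, List.replicate_zero,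
        List.append_nil]
      rw [PySem.List.pyGetD_natCast]
      rw [List.take_add_one, List.getElem?_eq_getElem h, List.map_append]
      simp [List.getD, List.getElem?_eq_getElem h]
    · have h1 : ¬ ((m : Int) < (lst.length : Int)) := by
        intro hc; exact h (by exact_mod_cast hc)
      have h2 : lst.take (m + 1) = lst.take m := by
        rw [List.take_add_one, List.getElem?_eq_none (by omega)]
        simp
      have h3 : m + 1 - lst.length = (m - lst.length) + 1 := by omega
      simp only [List.map_cons, List.map_nil, if_neg h1, h2, h3]
      rw [List.replicate_succ' (n := m - lst.length)]
      simp [List.append_assoc]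

-- ===== VERDICT (by name: the statement is the Claim_ definition above) =====
theorem get_list_vals_spec : Claim_equal_get_list_vals := by
  intro row field max _ _
  unfold Spec_get_list_vals get_list_vals get_list_vals_alt
  set lst := ((PySem.Dict.mk row).get? field).getD [] with hlst
  by_cases hm : max ≤ 0
  · rw [if_pos hm, PySem.List.pyRange_one_eq_nil hm]
    simp
  · rw [if_neg hm]
    replace hm : 0 < max := by omega
    rw [PySem.List.foldl_append_singleton_eq_map, PySem.List.pyRange_one 0 max]
    have h0 : ((max : Int) - 0).toNat = max.toNat := by omega
    rw [h0]
    simp only [List.nil_append, List.map_map, Function.comp_def]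
    have hmap : (fun k : Nat => if ((0 : Int) + (k : Int)) < (lst.length : Int) then
          some (PySem.Str.strip (PySem.List.pyGetD lst ((0 : Int) + (k : Int)) "")) else none)
        = fun k : Nat => if ((k : Int)) < (lst.length : Int) then
          some (PySem.Str.strip (PySem.List.pyGetD lst (k : Int) "")) else none := by
      funext k; norm_num
    rw [hmap, pv_key lst max.toNat]
    rw [PySem.List.slice_to lst (by omega : (0:Int) ≤ max)]
    congr 1
    congr 1
    have : ((lst.take max.toNat).map (fun s => some (PySem.Str.strip s))).length
        = min max.toNat lst.length := by simp
    rw [this]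
    omega
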